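-- pv_equiv track=rewrite | github.com/praxiseng/reveal | src/hasher.py | bitmask_fids
-- ===== SOURCE A (Python) =====
-- def btoh(b):
--     return ''.join(format(x, '02x') for x in b)
--
-- def bitmask_fids(fids):
--     if not fids:
--         return
--     max_fid = max(fids)
--     bitmask = bytearray(b'\x00' * ((max_fid // 8) + 2))
--     for fid in fids:
--         bitmask[fid // 8] |= 1 << (fid % 8)
--     return btoh(bytes(bitmask)).replace('0', ' ')
-- ===== SOURCE B (Python) =====
-- def bitmask_fids(fids):
--     if not fids:
--         return
--     # group fids by hex-digit (nibble) position: nibble q holds bit fid % 4 for fid // 4 == q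
--     nibbles = {}
--     for fid in fids:
--         q, r = divmod(fid, 4)
--         nibbles[q] = nibbles.get(q, 0) | (1 << r)
--     out = []
--     for byte in range((max(fids) // 8) + 2):
--         for nib in (nibbles.get(2 * byte + 1, 0), nibbles.get(2 * byte, 0)):
--             out.append(' ' if nib == 0 else format(nib, 'x'))
--     return ''.join(out)
-- ===== Notes on version B (the rewrite author's own statement) =====
-- stated objective: alternative
-- what changed: Instead of building a byte buffer and hex-dumping it, B groups fids by hex-digit (nibble) position in a dict (q, r = divmod(fid, 4)) and emits each output character directly from its nibble's bit set, writing ' ' for an empty nibble, so no bytes object, no hex formatting of bytes and no string replace pass exist; Pre_ excludes lists containing a negative fid (outside the natural domain of a fid bitmask), where A raises IndexError or returns a value only through Python's accidental negative-index wraparound into high bytes while B silently ignores the never-emitted negative nibble keys.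
-- outside the precondition, e.g. on bitmask_fids([5, -1]): A returns '2 8 ', B returns '2   '
import Mathlib
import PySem

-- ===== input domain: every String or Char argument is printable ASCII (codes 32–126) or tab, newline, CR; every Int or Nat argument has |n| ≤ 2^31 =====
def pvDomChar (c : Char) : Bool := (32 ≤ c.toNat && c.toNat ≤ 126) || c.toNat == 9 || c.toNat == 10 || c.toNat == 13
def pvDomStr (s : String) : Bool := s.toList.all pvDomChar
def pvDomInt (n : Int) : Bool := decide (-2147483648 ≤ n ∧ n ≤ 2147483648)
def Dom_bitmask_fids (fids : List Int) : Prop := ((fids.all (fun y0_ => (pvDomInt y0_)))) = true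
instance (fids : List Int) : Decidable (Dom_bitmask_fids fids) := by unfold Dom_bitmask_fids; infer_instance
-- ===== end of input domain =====

-- B groups fids by hex-digit (nibble) position in a dict and emits each output character
-- directly from its nibble, writing ' ' for an empty nibble: no byte buffer, no hex dump,
-- no replace pass; objective: alternative. Equality is proved on Pre_ (all fids nonnegative).

-- ===== PORT A =====

-- format(x, '02x'): two lowercase hex digits; exact for x < 256 (bytes), which is all A feeds it
def pvHexDigit (n : Nat) : Char := Char.ofNat (if n < 10 then 48 + n else 87 + n)
def pvHex2 (x : Nat) : List Char := [pvHexDigit (x / 16), pvHexDigit (x % 16)]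

-- btoh(b) = ''.join(format(x, '02x') for x in b)
def btoh (b : List Nat) : String := String.ofList (b.flatMap pvHex2)

-- the 'for fid in fids' loop over the bytearray; Python indexing (negative wraps, out of range = IndexError → none)
def aLoop : List Int → List Nat → Option (List Nat)
  | [], bs => some bs
  | fid :: rest, bs =>
    let i := PySem.Int.floordiv fid 8
    let j := if i < 0 then i + bs.length else i
    if 0 ≤ j ∧ j < (bs.length : Int) then
      aLoop rest (bs.set j.toNat ((bs.getD j.toNat 0) ||| ((1 : Nat) <<< (PySem.Int.mod fid 8).toNat)))
    else none

def bitmask_fids (fids : List Int) : Option String :=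
  match fids with
  | [] => none  -- bare 'return' → None
  | _ :: _ =>
    match PySem.List.max? fids (fun x => x) with
    | none => none  -- unreachable: fids is nonempty
    | some max_fid =>
      -- bytearray(b'\x00' * ((max_fid // 8) + 2)); a negative repeat count gives an empty bytes, hence .toNat
      let bitmask := List.replicate (PySem.Int.floordiv max_fid 8 + 2).toNat 0
      match aLoop fids bitmask with
      | none => none
      | some bs => some (PySem.Str.replace (btoh bs) "0" " ")

-- ===== PORT B =====

-- the grouping loop: nibbles[q] = nibbles.get(q, 0) | (1 << r) with q, r = divmod(fid, 4)
-- (Python's divmod by 4 yields r in 0..3 even for negative fid, so 1 << r never raises)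
def bNibbles : List Int → PySem.Dict Int Nat → PySem.Dict Int Nat
  | [], d => d
  | fid :: rest, d =>
    let q := PySem.Int.floordiv fid 4
    let r := PySem.Int.mod fid 4
    bNibbles rest (d.insert q ((d.getD q 0) ||| ((1 : Nat) <<< r.toNat)))

-- ' ' if nib == 0 else format(nib, 'x'); exact for nib < 16 (a single hex digit), which is
-- all B feeds it: every dict value is an OR of bits 1 << r with r in 0..3
def pvNibChar (nib : Nat) : Char := if nib = 0 then ' ' else pvHexDigit nib

def bitmask_fids_alt (fids : List Int) : Option String :=
  match fids with
  | [] => none  -- bare 'return' → None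
  | _ :: _ =>
    let d := bNibbles fids PySem.Dict.empty
    match PySem.List.max? fids (fun x => x) with
    | none => none  -- unreachable: fids is nonempty
    | some m =>
      some (String.ofList
        ((PySem.List.pyRange 0 (PySem.Int.floordiv m 8 + 2) 1).flatMap
          (fun byte => [pvNibChar (d.getD (2 * byte + 1) 0), pvNibChar (d.getD (2 * byte) 0)])))

-- ===== PRECONDITION & SPEC =====

-- Pre_ restricts to the natural domain of a fid bitmask: nonnegative ids. On a negative fid A
-- raises IndexError or returns a value only via Python's accidental negative-index wraparound
-- into high bytes of the bytearray, while B silently ignores the never-emitted negative nibble key.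
def Pre_bitmask_fids (fids : List Int) : Prop := ∀ fid ∈ fids, 0 ≤ fid
instance (fids : List Int) : Decidable (Pre_bitmask_fids fids) := by unfold Pre_bitmask_fids; infer_instance

def pvWitness_bitmask_fids : List Int := [0, 9, 17]

def Spec_bitmask_fids (fids : List Int) (out : Option String) : Prop := out = bitmask_fids_alt fids
instance (fids : List Int) (out : Option String) : Decidable (Spec_bitmask_fids fids out) := by unfold Spec_bitmask_fids; infer_instance

-- ===== CLAIM (what is proved, stated in full; the proofs are below) =====
def Claim_equal_bitmask_fids : Prop := ∀ (fids : List Int), Dom_bitmask_fids fids → Pre_bitmask_fids fids → Spec_bitmask_fids fids (bitmask_fids fids)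

-- ===== LEMMAS AND PROOFS =====

-- ghost accumulator: the whole bitmask as one natural number (used only by the proofs)
def pvGhost (fids : List Int) (n : Nat) : Nat :=
  fids.foldl (fun a f => a ||| ((1 : Nat) <<< f.toNat)) n

-- OR-ing bit f into n changes exactly the (f / w)-th w-bit field of n, OR-ing 2^(f % w) into it
lemma field_or_bit (w : Nat) (hw : 0 < w) (n f i : Nat) :
    ((n ||| (1 <<< f)) >>> (w * i)) % (2 ^ w) =
      if i = f / w then ((n >>> (w * i)) % (2 ^ w)) ||| ((1 : Nat) <<< (f % w))
      else (n >>> (w * i)) % (2 ^ w) := by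
  rw [Nat.one_shiftLeft, Nat.one_shiftLeft]
  split_ifs with hif
  · apply Nat.eq_of_testBit_eq; intro j
    rw [Nat.testBit_or, Nat.testBit_mod_two_pow, Nat.testBit_mod_two_pow,
      Nat.testBit_shiftRight, Nat.testBit_shiftRight, Nat.testBit_or, Nat.testBit_two_pow,
      Nat.testBit_two_pow]
    by_cases hj : j < w
    · have he : (f = w * i + j) ↔ (f % w = j) := by
        subst hif
        have hdm := Nat.div_add_mod f w
        have hlt := Nat.mod_lt f hw
        omega
      by_cases hfe : f % w = j <;> simp [hj, he, hfe]
    · simp [hj]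
      intro h
      have := Nat.mod_lt f hw
      omega
  · apply Nat.eq_of_testBit_eq; intro j
    rw [Nat.testBit_mod_two_pow, Nat.testBit_mod_two_pow, Nat.testBit_shiftRight,
      Nat.testBit_shiftRight, Nat.testBit_or, Nat.testBit_two_pow]
    by_cases hj : j < w
    · have hne : f ≠ w * i + j := by
        intro h
        apply hif
        subst h
        rw [Nat.mul_add_div hw, Nat.div_eq_of_lt hj]
        omega
      simp [hj, hne]
    · simp [hj]

-- A's loop produces exactly the little-endian byte view of the ghost integer
lemma aLoop_ghost (fids : List Int) :
    ∀ (bs : List Nat) (n : Nat),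
      (∀ f ∈ fids, 0 ≤ f ∧ f.toNat / 8 < bs.length) →
      (∀ i, i < bs.length → bs.getD i 0 = (n >>> (8 * i)) % 256) →
      aLoop fids bs = some ((List.range bs.length).map (fun i => (pvGhost fids n >>> (8 * i)) % 256)) := by
  induction fids with
  | nil =>
    intro bs n _ hinv
    simp only [aLoop, pvGhost, List.foldl_nil, Option.some.injEq]
    apply List.ext_getElem (by simp)
    intro i h1 h2
    have hi : i < bs.length := h1
    have := hinv i hi
    rw [List.getD_eq_getElem bs 0 hi] at this
    simpa using this
  | cons f rest ih =>
    intro bs n hbnd hinv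
    obtain ⟨hf0, hflt⟩ := hbnd f (List.mem_cons_self)
    have hfc : (f.toNat : Int) = f := Int.toNat_of_nonneg hf0
    have hdiv : PySem.Int.floordiv f 8 = ((f.toNat / 8 : Nat) : Int) := by
      rw [← hfc]; exact_mod_cast PySem.Int.floordiv_natCast f.toNat 8
    have hmod : PySem.Int.mod f 8 = ((f.toNat % 8 : Nat) : Int) := by
      rw [← hfc]; exact_mod_cast PySem.Int.mod_natCast f.toNat 8
    simp only [aLoop, hdiv, hmod]
    have hnonneg : ¬ (((f.toNat / 8 : Nat) : Int) < 0) := by omega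
    rw [if_neg hnonneg]
    have hrange : (0 : Int) ≤ ((f.toNat / 8 : Nat) : Int) ∧ ((f.toNat / 8 : Nat) : Int) < (bs.length : Int) := by
      constructor
      · omega
      · exact_mod_cast hflt
    rw [if_pos hrange]
    have htn : (((f.toNat / 8 : Nat) : Int)).toNat = f.toNat / 8 := by omega
    have htm : (((f.toNat % 8 : Nat) : Int)).toNat = f.toNat % 8 := by omega
    rw [htn, htm]
    set bs' := bs.set (f.toNat / 8) ((bs.getD (f.toNat / 8) 0) ||| ((1 : Nat) <<< (f.toNat % 8))) with hbs'
    have hlen : bs'.length = bs.length := by simp [hbs']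
    have hrec := ih bs' (n ||| ((1 : Nat) <<< f.toNat))
      (by intro g hg
          obtain ⟨h1, h2⟩ := hbnd g (List.mem_cons_of_mem _ hg)
          exact ⟨h1, by rw [hlen]; exact h2⟩)
      (by
        intro i hi
        rw [hlen] at hi
        have h256 : (256 : Nat) = 2 ^ 8 := by norm_num
        rw [h256, field_or_bit 8 (by norm_num)]
        have hib : i < bs'.length := by rw [hlen]; exact hi
        rw [List.getD_eq_getElem _ 0 hib]
        by_cases hie : i = f.toNat / 8
        · subst hie
          rw [if_pos rfl]
          simp only [hbs', List.getElem_set, if_true]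
          rw [hinv _ hi, h256]
        · rw [if_neg hie]
          simp only [hbs', List.getElem_set, if_neg (Ne.symm hie)]
          rw [← List.getD_eq_getElem _ 0 hi, hinv _ hi, h256])
    rw [hrec, hlen]
    simp only [pvGhost, List.foldl_cons]

-- B's dict holds exactly the little-endian nibble view of the ghost integer (at nonneg keys)
lemma bNibbles_ghost (fids : List Int) :
    ∀ (d : PySem.Dict Int Nat) (n : Nat),
      (∀ f ∈ fids, 0 ≤ f) →
      (∀ k : Nat, d.getD (k : Int) 0 = (n >>> (4 * k)) % 16) →
      ∀ k : Nat, (bNibbles fids d).getD (k : Int) 0 = (pvGhost fids n >>> (4 * k)) % 16 := by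
  induction fids with
  | nil =>
    intro d n _ hinv k
    simpa [bNibbles, pvGhost] using hinv k
  | cons f rest ih =>
    intro d n hpre hinv k
    have hf0 : 0 ≤ f := hpre f (List.mem_cons_self)
    have hfc : (f.toNat : Int) = f := Int.toNat_of_nonneg hf0
    have hdiv : PySem.Int.floordiv f 4 = ((f.toNat / 4 : Nat) : Int) := by
      rw [← hfc]; exact_mod_cast PySem.Int.floordiv_natCast f.toNat 4
    have hmod : PySem.Int.mod f 4 = ((f.toNat % 4 : Nat) : Int) := by
      rw [← hfc]; exact_mod_cast PySem.Int.mod_natCast f.toNat 4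
    have htm : (((f.toNat % 4 : Nat) : Int)).toNat = f.toNat % 4 := by omega
    simp only [bNibbles, hdiv, hmod, htm]
    have hstep := ih (d.insert ((f.toNat / 4 : Nat) : Int) ((d.getD ((f.toNat / 4 : Nat) : Int) 0) ||| ((1 : Nat) <<< (f.toNat % 4))))
      (n ||| ((1 : Nat) <<< f.toNat))
      (fun g hg => hpre g (List.mem_cons_of_mem _ hg))
      (by
        intro j
        have h16 : (16 : Nat) = 2 ^ 4 := by norm_num
        rw [PySem.Dict.getD_insert, h16, field_or_bit 4 (by norm_num)]
        by_cases hje : j = f.toNat / 4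
        · subst hje
          rw [if_pos rfl, if_pos rfl, hinv, h16]
        · rw [if_neg (by exact_mod_cast hje), if_neg hje, hinv, h16])
    simpa [pvGhost] using hstep k

-- replacing one character by one character is a pointwise map
lemma replace_go_single (c e : Char) :
    ∀ (fuel : Nat) (l acc : List Char), l.length ≤ fuel →
      PySem.Chars.replace.go [c] [e] fuel l acc =
        acc.reverse ++ l.map (fun x => if x = c then e else x) := by
  intro fuel
  induction fuel with
  | zero =>
    intro l acc hl
    have : l = [] := List.eq_nil_of_length_eq_zero (by omega)
    subst this
    simp [PySem.Chars.replace.go]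
  | succ m ih =>
    intro l acc hl
    match l with
    | [] => simp [PySem.Chars.replace.go]
    | x :: t =>
      simp only [PySem.Chars.replace.go]
      by_cases hx : x = c
      · subst hx
        rw [if_pos (by simp [List.isPrefixOf])]
        rw [ih _ _ (by simpa using Nat.le_of_succ_le_succ hl)]
        simp
      · rw [if_neg (by simp [List.isPrefixOf]; exact fun h => hx h.symm)]
        rw [ih _ _ (by simpa using Nat.le_of_succ_le_succ hl)]
        simp [hx]

lemma replace_single (c e : Char) (l : List Char) :
    PySem.Chars.replace l [c] [e] = l.map (fun x => if x = c then e else x) := by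
  rw [PySem.Chars.replace]
  rw [if_neg (by simp)]
  simpa using replace_go_single c e l.length l [] le_rfl

-- a hex digit renders as '0' exactly for the value 0 (values below 16)
lemma nibble_char (v : Nat) (hv : v < 16) :
    (if pvHexDigit v = '0' then ' ' else pvHexDigit v) = pvNibChar v := by
  interval_cases v <;> decide

-- ===== VERDICT (by name: the statement is the Claim_ definition above) =====
set_option maxHeartbeats 1000000 in
theorem bitmask_fids_spec : Claim_equal_bitmask_fids := by
  intro fids _ hpre
  unfold Spec_bitmask_fids
  match fids with
  | [] => rfl
  | x :: t =>
    cases hmax : PySem.List.max? (x :: t) (fun y => y) with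
    | none => exact absurd hmax (by simp [PySem.List.max?_eq_none_iff])
    | some m =>
      have hm0 : 0 ≤ m := hpre m (PySem.List.max?_mem hmax)
      have hmc : (m.toNat : Int) = m := Int.toNat_of_nonneg hm0
      have hdivm : PySem.Int.floordiv m 8 = ((m.toNat / 8 : Nat) : Int) := by
        rw [← hmc]; exact_mod_cast PySem.Int.floordiv_natCast m.toNat 8
      set L : Nat := m.toNat / 8 + 2 with hL
      have hlen : (PySem.Int.floordiv m 8 + 2).toNat = L := by rw [hdivm]; omega
      set N : Nat := pvGhost (x :: t) 0 with hN
      have ha := aLoop_ghost (x :: t) (List.replicate (PySem.Int.floordiv m 8 + 2).toNat 0) 0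
        (by
          intro f hf
          have hf0 := hpre f hf
          have hfm : f ≤ m := PySem.List.max?_isMax hmax f hf
          refine ⟨hf0, ?_⟩
          rw [List.length_replicate, hlen]
          omega)
        (by intro i hi; simp)
      have ha' : aLoop (x :: t) (List.replicate (PySem.Int.floordiv m 8 + 2).toNat 0)
          = some ((List.range L).map (fun i => (N >>> (8 * i)) % 256)) := by
        rw [ha, List.length_replicate, hlen]
      have hd := bNibbles_ghost (x :: t) PySem.Dict.empty 0 hpre
        (by intro k; simp [PySem.Dict.getD_empty])
      simp only [bitmask_fids, bitmask_fids_alt, hmax, ha']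
      congr 1
      rw [PySem.Str.replace]
      refine congrArg String.ofList ?_
      have htl : ∀ l : List Char, (String.ofList l).toList = l := by intro l; simp
      have h0 : ("0" : String).toList = ['0'] := rfl
      have hsp : (" " : String).toList = [' '] := rfl
      rw [btoh, htl, h0, hsp, replace_single]
      rw [List.flatMap_map, List.map_flatMap]
      have hrange : PySem.List.pyRange 0 (PySem.Int.floordiv m 8 + 2) 1
          = (List.range L).map (fun k => ((k : Nat) : Int)) := by
        rw [PySem.List.pyRange_one]
        have : (PySem.Int.floordiv m 8 + 2 - 0).toNat = L := by rw [hdivm]; omega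
        rw [this]
        simp
      rw [hrange, List.flatMap_map]
      rw [List.flatMap_def, List.flatMap_def]
      congr 1
      apply List.map_congr_left
      intro k hk
      have hk' : k < L := List.mem_range.mp hk
      have hb1 : (N >>> (8 * k) % 256) / 16 = N >>> (4 * (2 * k + 1)) % 16 := by
        rw [Nat.shiftRight_eq_div_pow, Nat.shiftRight_eq_div_pow]
        have h2 : (2 : Nat) ^ (4 * (2 * k + 1)) = 2 ^ (8 * k) * 2 ^ 4 := by
          rw [← pow_add]; ring_nf
        rw [h2, ← Nat.div_div_eq_div_mul]
        omega
      have hb2 : (N >>> (8 * k) % 256) % 16 = N >>> (4 * (2 * k)) % 16 := by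
        have h2 : 4 * (2 * k) = 8 * k := by ring
        rw [h2]
        omega
      have hc2 : (2 * ((k : Nat) : Int)) = (((2 * k : Nat)) : Int) := by push_cast; ring
      have hc1 : (((2 * k : Nat)) : Int) + 1 = (((2 * k + 1 : Nat)) : Int) := by push_cast; ring
      simp only [pvHex2, List.map_cons, List.map_nil, hc2, hc1, hd, ← hN]
      rw [hb1, hb2]
      rw [nibble_char _ (Nat.mod_lt _ (by norm_num)), nibble_char _ (Nat.mod_lt _ (by norm_num))]
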